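-- pv_equiv track=rewrite | github.com/gutoiualexandru/Distributed_inverse_ladder | distributed_specs.py | layered_module_counts
-- ===== SOURCE A (Python) =====
-- import math
--
-- def layered_module_counts(n_qubits: int, module_capacity: int) -> list[int]:
--     """Return the number of modules per layer for the distributed ladder scheme."""
--     if n_qubits <= 0:
--         raise ValueError("n_qubits must be positive.")
--     if module_capacity < 2:
--         raise ValueError("module_capacity must be at least 2.")
--
--     counts: list[int] = []
--     current = math.ceil(n_qubits / module_capacity)
--     counts.append(current)
--
--     while current > 1:
--         current = math.ceil(current / module_capacity)
--         counts.append(current)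
--
--     return counts
-- ===== SOURCE B (Python) =====
-- def layered_module_counts(n_qubits: int, module_capacity: int) -> list[int]:
--     """Return the number of modules per layer for the distributed ladder scheme."""
--     if n_qubits <= 0:
--         raise ValueError("n_qubits must be positive.")
--     if module_capacity < 2:
--         raise ValueError("module_capacity must be at least 2.")
--
--     counts: list[int] = []
--     divisor = module_capacity
--     while True:
--         count = -(-n_qubits // divisor)  # exact integer ceil(n_qubits / divisor)
--         counts.append(count)
--         if count <= 1:
--             return counts
--         divisor *= module_capacity
-- ===== Notes on version B (the rewrite author's own statement) =====
-- stated objective: alternative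
-- what changed: B drops A's chained feedback loop (ceil-dividing the previous layer's count each step) and instead computes each layer directly as ceil(n_qubits / divisor) from a running divisor that accumulates powers of module_capacity, using exact integer ceiling division -(-n//d) instead of float math.ceil.
import Mathlib
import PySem

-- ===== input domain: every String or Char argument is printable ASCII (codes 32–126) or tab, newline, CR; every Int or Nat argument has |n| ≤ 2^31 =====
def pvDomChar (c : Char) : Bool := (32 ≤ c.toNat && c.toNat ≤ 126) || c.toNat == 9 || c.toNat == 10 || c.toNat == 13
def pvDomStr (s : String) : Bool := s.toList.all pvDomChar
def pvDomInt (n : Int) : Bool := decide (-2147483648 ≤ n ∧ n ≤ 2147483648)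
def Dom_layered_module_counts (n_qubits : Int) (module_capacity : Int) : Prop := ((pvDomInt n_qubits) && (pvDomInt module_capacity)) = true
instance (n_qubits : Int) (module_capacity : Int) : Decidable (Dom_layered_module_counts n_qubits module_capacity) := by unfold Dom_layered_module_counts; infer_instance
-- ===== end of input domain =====

-- B replaces A's chained feedback loop (each layer ceil-divides the previous count) by computing each
-- layer directly as ceil(n_qubits / capacity^k) from a running divisor; same asymptotic cost (alternative).

-- math.ceil(a / b): exact integer ceiling division on the stated domain (|a| ≤ 2^31 < 2^53, so the
-- float division in Python is exact enough that ceil gives the integer ceiling).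
def pvCeil (a b : Int) : Int := -(PySem.Int.floordiv (-a) b)

-- ===== PORT A =====
-- 'while current > 1: current = ceil(current/cap); append' — fuel n_qubits.toNat bounds the iterations
-- (current strictly decreases while > 1), guard only makes the recursion structural.
def pvLoopA (cap : Int) : Nat → Int → List Int
  | 0, _ => []
  | f + 1, c =>
    if c > 1 then
      let c' := pvCeil c cap
      c' :: pvLoopA cap f c'
    else []

def layered_module_counts (n_qubits : Int) (module_capacity : Int) : List Int :=
  let c0 := pvCeil n_qubits module_capacity
  c0 :: pvLoopA module_capacity n_qubits.toNat c0

-- ===== PORT B =====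
-- 'while True: append ceil(n/divisor); return if ≤ 1; divisor *= cap' — same fuel bound.
def pvLoopB (n cap : Int) : Nat → Int → List Int
  | 0, _ => []
  | f + 1, d =>
    let v := pvCeil n d
    v :: (if v ≤ 1 then [] else pvLoopB n cap f (d * cap))

def layered_module_counts_alt (n_qubits : Int) (module_capacity : Int) : List Int :=
  pvLoopB n_qubits module_capacity (n_qubits.toNat + 1) module_capacity

-- ===== PRECONDITION & SPEC =====
-- Exactly the inputs where Python A returns (otherwise it raises ValueError).
def Pre_layered_module_counts (n_qubits : Int) (module_capacity : Int) : Prop :=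
  1 ≤ n_qubits ∧ 2 ≤ module_capacity
instance (n_qubits : Int) (module_capacity : Int) : Decidable (Pre_layered_module_counts n_qubits module_capacity) := by unfold Pre_layered_module_counts; infer_instance

def pvWitness_layered_module_counts : Int × Int := (10, 3)

def Spec_layered_module_counts (n_qubits : Int) (module_capacity : Int) (out : List Int) : Prop := out = layered_module_counts_alt n_qubits module_capacity
instance (n_qubits : Int) (module_capacity : Int) (out : List Int) : Decidable (Spec_layered_module_counts n_qubits module_capacity out) := by unfold Spec_layered_module_counts; infer_instance

-- ===== CLAIM (what is proved, stated in full; the proofs are below) =====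
def Claim_equal_layered_module_counts : Prop := ∀ (n_qubits : Int) (module_capacity : Int), Dom_layered_module_counts n_qubits module_capacity → Pre_layered_module_counts n_qubits module_capacity → Spec_layered_module_counts n_qubits module_capacity (layered_module_counts n_qubits module_capacity)

-- ===== LEMMAS AND PROOFS =====

-- ceil(ceil(n/d)/c) = ceil(n/(d·c)) for positive divisors.
theorem pvCeil_mul (n d c : Int) (hd : 0 < d) (hc : 0 < c) :
    pvCeil n (d * c) = pvCeil (pvCeil n d) c := by
  unfold pvCeil
  rw [PySem.Int.floordiv_eq_ediv_of_pos hd, PySem.Int.floordiv_eq_ediv_of_pos hc,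
      PySem.Int.floordiv_eq_ediv_of_pos (by positivity : (0:Int) < d * c),
      neg_neg, Int.ediv_ediv_of_nonneg (le_of_lt hd)]

theorem pvLoopA_succ (cap : Int) (f : Nat) (c : Int) :
    pvLoopA cap (f + 1) c =
      if c > 1 then pvCeil c cap :: pvLoopA cap f (pvCeil c cap) else [] := rfl

theorem pvLoopB_succ (n cap : Int) (f : Nat) (d : Int) :
    pvLoopB n cap (f + 1) d =
      pvCeil n d :: (if pvCeil n d ≤ 1 then [] else pvLoopB n cap f (d * cap)) := rfl

theorem pvLoopB_eq_loopA (n cap : Int) (hcap : 0 < cap) :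
    ∀ (f : Nat) (d : Int), 0 < d →
      pvLoopB n cap (f + 1) d = pvCeil n d :: pvLoopA cap f (pvCeil n d) := by
  intro f
  induction f with
  | zero =>
    intro d _
    simp only [pvLoopB, pvLoopA]
    split <;> rfl
  | succ g ih =>
    intro d hd
    have hdc : 0 < d * cap := by positivity
    rw [pvLoopB_succ, pvLoopA_succ, ih (d * cap) hdc, ← pvCeil_mul n d cap hd hcap]
    by_cases h : pvCeil n d ≤ 1
    · rw [if_pos h, if_neg (not_lt.mpr h)]
    · rw [if_neg h, if_pos (lt_of_not_ge h)]

-- ===== VERDICT (by name: the statement is the Claim_ definition above) =====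
theorem layered_module_counts_spec : Claim_equal_layered_module_counts := by
  intro n cap _ hpre
  obtain ⟨hn, hc⟩ := hpre
  unfold Spec_layered_module_counts layered_module_counts layered_module_counts_alt
  rw [pvLoopB_eq_loopA n cap (by omega : (0:Int) < cap) n.toNat cap (by omega)]
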